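-- pv_equiv track=rewrite | github.com/Croot-ng/Nkill | src/gui.py | toplam_kontrol
-- ===== SOURCE A (Python) =====
-- def toplam_kontrol(veri):
--     toplam = 0
--     kontrol_sinir = (len(veri) // 2) * 2
--     for i in range(0, kontrol_sinir, 2):
--         deger = veri[i] + (veri[i + 1] << 8)
--         toplam += deger
--         toplam &= 0xffffffff
--     if kontrol_sinir < len(veri):
--         toplam += veri[-1]
--         toplam &= 0xffffffff
--     toplam = (toplam >> 16) + (toplam & 0xffff)
--     toplam += (toplam >> 16)
--     sonuc = ~toplam & 0xffff
--     return sonuc >> 8 | (sonuc << 8 & 0xff00)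
-- ===== SOURCE B (Python) =====
-- def toplam_kontrol(veri):
--     total = (sum(veri[0::2]) + (sum(veri[1::2]) << 8)) & 0xffffffff
--     total = (total >> 16) + (total & 0xffff)
--     total += total >> 16
--     sonuc = ~total & 0xffff
--     return sonuc >> 8 | (sonuc << 8 & 0xff00)
-- ===== Notes on version B (the rewrite author's own statement) =====
-- stated objective: simpler
-- what changed: Replaces A's explicit word-by-word loop (pairing bytes by index and masking the accumulator every iteration) with two strided slice sums (veri[0::2], veri[1::2]) combined and masked once; the fold/complement/byte-swap tail is unchanged.
import Mathlib
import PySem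

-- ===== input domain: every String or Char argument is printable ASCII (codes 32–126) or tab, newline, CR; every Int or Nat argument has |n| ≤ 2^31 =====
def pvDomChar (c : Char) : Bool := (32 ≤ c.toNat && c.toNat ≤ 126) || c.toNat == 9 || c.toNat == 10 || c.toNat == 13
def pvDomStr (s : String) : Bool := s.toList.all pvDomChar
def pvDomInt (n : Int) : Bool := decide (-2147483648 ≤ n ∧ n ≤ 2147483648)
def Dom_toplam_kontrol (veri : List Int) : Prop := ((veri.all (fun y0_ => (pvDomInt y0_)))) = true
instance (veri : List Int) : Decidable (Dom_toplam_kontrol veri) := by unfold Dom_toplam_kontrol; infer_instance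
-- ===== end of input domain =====

-- B replaces A's word-by-word masking loop with two strided slice sums combined and masked once (simpler decomposition; no speed claim).

-- ===== PORT A =====
-- Bitwise ops on the loop accumulator are ported arithmetically, exactly on the values that arise:
-- 'x & 0xffffffff' on any Python int is x mod 2^32 (PySem.Int.mod = fmod), 'x >> 16' on the
-- nonnegative folded accumulator is floordiv by 2^16, '~x & 0xffff' is (-x-1) mod 2^16, and
-- 'sonuc >> 8 | (sonuc << 8 & 0xff00)' for 0 ≤ sonuc < 2^16 is the sum of the two disjoint byte fields.
-- 'veri[i] << 8' is veri[i] * 256; loop indices come from range(0, kontrol_sinir, 2) and are always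
-- in range, so veri[i] is ported as pyGetD veri i 0 (the default is never used).
def toplam_kontrol (veri : List Int) : Int :=
  let kontrol_sinir : Int := PySem.Int.floordiv (veri.length : Int) 2 * 2
  let toplam : Int :=
    (PySem.List.pyRange 0 kontrol_sinir 2).foldl
      (fun toplam i =>
        let deger := PySem.List.pyGetD veri i 0 + PySem.List.pyGetD veri (i + 1) 0 * 256
        PySem.Int.mod (toplam + deger) 4294967296) 0
  let toplam : Int :=
    if kontrol_sinir < (veri.length : Int) then
      PySem.Int.mod (toplam + PySem.List.pyGetD veri (-1) 0) 4294967296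
    else toplam
  let toplam : Int := PySem.Int.floordiv toplam 65536 + PySem.Int.mod toplam 65536
  let toplam : Int := toplam + PySem.Int.floordiv toplam 65536
  let sonuc : Int := PySem.Int.mod (-toplam - 1) 65536
  PySem.Int.floordiv sonuc 256 + PySem.Int.mod sonuc 256 * 256

-- ===== PORT B =====
-- veri[0::2] / veri[1::2] are PySem.List.slice? with step 2 (never none since the step is nonzero,
-- so '.getD []' is exact); the bitwise operators are ported arithmetically exactly as in port A.
def toplam_kontrol_alt (veri : List Int) : Int :=
  let evens : List Int := (PySem.List.slice? veri (some 0) none 2).getD []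
  let odds  : List Int := (PySem.List.slice? veri (some 1) none 2).getD []
  let total : Int := PySem.Int.mod (evens.sum + odds.sum * 256) 4294967296
  let total : Int := PySem.Int.floordiv total 65536 + PySem.Int.mod total 65536
  let total : Int := total + PySem.Int.floordiv total 65536
  let sonuc : Int := PySem.Int.mod (-total - 1) 65536
  PySem.Int.floordiv sonuc 256 + PySem.Int.mod sonuc 256 * 256

-- ===== PRECONDITION & SPEC =====
def Spec_toplam_kontrol (veri : List Int) (out : Int) : Prop := out = toplam_kontrol_alt veri
instance (veri : List Int) (out : Int) : Decidable (Spec_toplam_kontrol veri out) := by unfold Spec_toplam_kontrol; infer_instance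

-- ===== CLAIM (what is proved, stated in full; the proofs are below) =====
def Claim_equal_toplam_kontrol : Prop := ∀ (veri : List Int), Dom_toplam_kontrol veri → Spec_toplam_kontrol veri (toplam_kontrol veri)

-- ===== LEMMAS AND PROOFS =====

theorem pv_sliceIdx (n : Nat) (a : Int) (h0 : 0 ≤ a) (h1 : a ≤ n) :
    PySem.List.sliceIndices n (some a) none 2 = (a, (n:Int), 2) := by
  unfold PySem.List.sliceIndices
  norm_num
  omega

theorem pv_slice2 (veri : List Int) (a : Nat) (h1 : a ≤ veri.length) :
    PySem.List.slice? veri (some (a:Int)) none 2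
      = some ((List.range ((veri.length - a + 1) / 2)).map (fun k => veri.getD (a + 2 * k) 0)) := by
  unfold PySem.List.slice?
  rw [if_neg (by norm_num), pv_sliceIdx veri.length a (by omega) (by exact_mod_cast h1)]
  have hcount : (if (a:Int) < (veri.length:Int) then (((veri.length:Int) - a + 2 - 1) / 2).toNat else 0)
      = (veri.length - a + 1) / 2 := by split_ifs with h <;> omega
  simp only [show ((0:Int) < 2) = True from by norm_num, if_true, hcount]
  congr 1
  rw [List.filterMap_congr (g := fun k => some (veri.getD (a + 2 * k) 0)) ?_]
  · exact List.filterMap_eq_map (f := fun k => veri.getD (a + 2 * k) 0) ▸ rfl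
  · intro k hk
    rw [List.mem_range] at hk
    have hki : ((a:Int) + 2 * (k:Int)).toNat = a + 2 * k := by omega
    rw [hki]
    have hlt : a + 2 * k < veri.length := by omega
    simp [List.getD, List.getElem?_eq_getElem hlt]

theorem pv_fold_mod {α : Type} (g : α → Int) (l : List α) (t : Int) (h0 : 0 ≤ t) (h1 : t < 4294967296) :
    l.foldl (fun t i => PySem.Int.mod (t + g i) 4294967296) t
      = PySem.Int.mod (t + (l.map g).sum) 4294967296 := by
  induction l generalizing t with
  | nil => simp [PySem.Int.mod_eq_emod_of_pos (by norm_num : (0:Int) < 4294967296),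
      Int.emod_eq_of_lt h0 h1]
  | cons a l ih =>
    simp only [List.foldl_cons, List.map_cons, List.sum_cons]
    have hm : PySem.Int.mod (t + g a) 4294967296 = (t + g a) % 4294967296 :=
      PySem.Int.mod_eq_emod_of_pos (by norm_num)
    rw [hm, ih _ (Int.emod_nonneg _ (by norm_num)) (Int.emod_lt_of_pos _ (by norm_num))]
    rw [PySem.Int.mod_eq_emod_of_pos (by norm_num), PySem.Int.mod_eq_emod_of_pos (by norm_num)]
    omega

theorem pv_sum_mul (l : List Nat) (f : Nat → Int) :
    (l.map (fun k => f k * 256)).sum = (l.map f).sum * 256 := by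
  induction l with
  | nil => simp
  | cons a l ih => simp [ih, add_mul]

theorem pv_mod_add (x y : Int) :
    PySem.Int.mod (PySem.Int.mod x 4294967296 + y) 4294967296 = PySem.Int.mod (x + y) 4294967296 := by
  rw [PySem.Int.mod_eq_emod_of_pos (by norm_num), PySem.Int.mod_eq_emod_of_pos (by norm_num),
      PySem.Int.mod_eq_emod_of_pos (by norm_num)]
  omega

theorem pv_get_neg_one (veri : List Int) (h : 1 ≤ veri.length) :
    PySem.List.pyGetD veri (-1) 0 = veri.getD (veri.length - 1) 0 := by
  unfold PySem.List.pyGetD PySem.List.pyGet? PySem.List.pyIdx?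
  have h1 : ¬ ((0:Int) ≤ -1) := by norm_num
  have h2 : -(veri.length:Int) ≤ -1 := by omega
  simp [h1, h2, List.getD]

theorem pv_core_eq (veri : List Int) :
    (let kontrol_sinir : Int := PySem.Int.floordiv (veri.length : Int) 2 * 2
     let toplam : Int :=
       (PySem.List.pyRange 0 kontrol_sinir 2).foldl
         (fun toplam i =>
           let deger := PySem.List.pyGetD veri i 0 + PySem.List.pyGetD veri (i + 1) 0 * 256
           PySem.Int.mod (toplam + deger) 4294967296) 0
     if kontrol_sinir < (veri.length : Int) then
       PySem.Int.mod (toplam + PySem.List.pyGetD veri (-1) 0) 4294967296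
     else toplam)
    = PySem.Int.mod (((PySem.List.slice? veri (some 0) none 2).getD []).sum
        + ((PySem.List.slice? veri (some 1) none 2).getD []).sum * 256) 4294967296 := by
  rcases Nat.eq_zero_or_pos veri.length with h0 | hpos
  · have hnil : veri = [] := List.length_eq_zero_iff.mp h0
    subst hnil
    decide
  · simp only []
    have hks : PySem.Int.floordiv (veri.length : Int) 2 * 2 = ((veri.length/2 : Nat) : Int) * 2 := by
      rw [PySem.Int.floordiv_eq_ediv_of_pos (by norm_num)]; omega
    have hrange : PySem.List.pyRange 0 (((veri.length/2 : Nat) : Int) * 2) 2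
        = (List.range (veri.length/2)).map (fun k : Nat => (0:Int) + 2 * (k:Int)) := by
      rw [PySem.List.pyRange_of_pos _ _ (by norm_num : (0:Int) < 2)]
      have hc : (if (0:Int) < ((veri.length/2 : Nat) : Int) * 2 then
          ((((veri.length/2 : Nat) : Int) * 2 - 0 + 2 - 1) / 2).toNat else 0) = veri.length / 2 := by
        split_ifs with h <;> omega
      rw [hc]
    rw [hks, hrange]
    rw [List.foldl_map (f := fun k : Nat => (0:Int) + 2 * (k:Int))
          (g := fun toplam i =>
            PySem.Int.mod (toplam + (PySem.List.pyGetD veri i 0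
              + PySem.List.pyGetD veri (i + 1) 0 * 256)) 4294967296)
          (l := List.range (veri.length/2)) (init := 0)]
    rw [pv_fold_mod (fun k : Nat =>
          PySem.List.pyGetD veri ((0:Int) + 2 * (k:Int)) 0
            + PySem.List.pyGetD veri ((0:Int) + 2 * (k:Int) + 1) 0 * 256)
          (List.range (veri.length/2)) 0 (by norm_num) (by norm_num)]
    have hmapA : (List.range (veri.length/2)).map (fun k : Nat =>
          PySem.List.pyGetD veri ((0:Int) + 2 * (k:Int)) 0
            + PySem.List.pyGetD veri ((0:Int) + 2 * (k:Int) + 1) 0 * 256)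
        = (List.range (veri.length/2)).map (fun k : Nat =>
            veri.getD (0 + 2 * k) 0 + veri.getD (1 + 2 * k) 0 * 256) := by
      apply List.map_congr_left
      intro k hk
      rw [PySem.List.pyGetD_of_nonneg _ _ (by omega), PySem.List.pyGetD_of_nonneg _ _ (by omega)]
      have e1 : ((0:Int) + 2 * (k:Int)).toNat = 0 + 2 * k := by omega
      have e2 : ((0:Int) + 2 * (k:Int) + 1).toNat = 1 + 2 * k := by omega
      rw [e1, e2]
    have hs0 : PySem.List.slice? veri (some 0) none 2
        = some ((List.range ((veri.length - 0 + 1) / 2)).map (fun k => veri.getD (0 + 2 * k) 0)) := by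
      exact_mod_cast pv_slice2 veri 0 (by omega)
    have hs1 : PySem.List.slice? veri (some 1) none 2
        = some ((List.range ((veri.length - 1 + 1) / 2)).map (fun k => veri.getD (1 + 2 * k) 0)) := by
      exact_mod_cast pv_slice2 veri 1 hpos
    rw [hmapA, PySem.List.sum_map_add_int, pv_sum_mul, hs0, hs1]
    simp only [Option.getD_some]
    have hodd1 : veri.length - 1 + 1 = veri.length := by omega
    rw [hodd1]
    by_cases hodd : veri.length % 2 = 1
    · rw [if_pos (by omega)]
      rw [pv_get_neg_one veri hpos, pv_mod_add]
      have hceil : (veri.length - 0 + 1) / 2 = veri.length / 2 + 1 := by omega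
      rw [hceil, List.range_succ, List.map_append, List.sum_append]
      have hlast : veri.getD (0 + 2 * (veri.length / 2)) 0 = veri.getD (veri.length - 1) 0 := by
        congr 1
        omega
      simp only [List.map_cons, List.map_nil, List.sum_cons, List.sum_nil, add_zero, hlast]
      ring_nf
    · rw [if_neg (by omega)]
      have hceil : (veri.length - 0 + 1) / 2 = veri.length / 2 := by omega
      rw [hceil]
      ring_nf

-- ===== VERDICT (by name: the statement is the Claim_ definition above) =====
theorem toplam_kontrol_spec : Claim_equal_toplam_kontrol := by
  intro veri _
  unfold Spec_toplam_kontrol toplam_kontrol toplam_kontrol_alt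
  have h := pv_core_eq veri
  simp only at h ⊢
  rw [h]
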